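-- pv_equiv track=rewrite | github.com/pypi-data/pypi-mirror-397 | packages/BayesInference/bayesinference-0.0.45.tar.gz/bayesinference-0.0.45/BI/PostModel/to_latex.py | format_latex_var
-- ===== SOURCE A (Python) =====
-- greek_symbols = {
--     'alpha': '\\alpha', 'beta': '\\beta', 'gamma': '\\gamma', 'delta': '\\delta',
--     'epsilon': '\\epsilon', 'zeta': '\\zeta', 'eta': '\\eta', 'theta': '\\theta',
--     'iota': '\\iota', 'kappa': '\\kappa', 'lambda_': '\\lambda', 'mu': '\\mu',
--     'nu': '\\nu', 'xi': '\\xi', 'omicron': 'o', 'pi': '\\pi', 'rho': '\\rho',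
--     'sigma': '\\sigma', 'tau': '\\tau', 'upsilon': '\\upsilon', 'phi': '\\phi',
--     'chi': '\\chi', 'psi': '\\psi', 'omega': '\\omega'
-- }
--
-- latex_accents = {
--     'bar': '\\bar', 'hat': '\\hat', 'tilde': '\\tilde', 'vec': '\\vec',
--     'dot': '\\dot', 'ddot': '\\ddot'
-- }
--
-- def convert_to_greek(var_name):
--     return greek_symbols.get(var_name.lower(), var_name)
--
-- def format_latex_var(var_name):
--     """
--     Formats a Python variable name into a LaTeX string, handling Greek symbols,
--     accents (e.g., 'bar_alpha'), and subscripts with escaped underscores.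
--     """
--     if var_name in greek_symbols:
--         return greek_symbols[var_name]
--
--     if '_' in var_name:
--         parts = var_name.split('_', 1)
--         part1, part2 = parts[0], parts[1]
--
--         if part1 in latex_accents:
--             accent_cmd = latex_accents[part1]
--             inner_var_latex = format_latex_var(part2)
--             return f"{accent_cmd}{{{inner_var_latex}}}"
--         else:
--             base = convert_to_greek(part1)
--             # MODIFICATION 1: Escape underscores in the subscript part to prevent KaTeX errors.
--             subscript = part2.replace('_', r'\_')
--             return f"{base}_{{{subscript}}}"
--
--     return convert_to_greek(var_name)
-- ===== SOURCE B (Python) =====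
-- greek_symbols = {
--     'alpha': '\\alpha', 'beta': '\\beta', 'gamma': '\\gamma', 'delta': '\\delta',
--     'epsilon': '\\epsilon', 'zeta': '\\zeta', 'eta': '\\eta', 'theta': '\\theta',
--     'iota': '\\iota', 'kappa': '\\kappa', 'lambda_': '\\lambda', 'mu': '\\mu',
--     'nu': '\\nu', 'xi': '\\xi', 'omicron': 'o', 'pi': '\\pi', 'rho': '\\rho',
--     'sigma': '\\sigma', 'tau': '\\tau', 'upsilon': '\\upsilon', 'phi': '\\phi',
--     'chi': '\\chi', 'psi': '\\psi', 'omega': '\\omega'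
-- }
--
-- latex_accents = {
--     'bar': '\\bar', 'hat': '\\hat', 'tilde': '\\tilde', 'vec': '\\vec',
--     'dot': '\\dot', 'ddot': '\\ddot'
-- }
--
-- def convert_to_greek(var_name):
--     return greek_symbols.get(var_name.lower(), var_name)
--
-- def format_latex_var(var_name):
--     # Phase 1: strip all leading accent prefixes "key_" by string-prefix matching.
--     # This is sound because no greek_symbols key starts with an accent prefix,
--     # so A's greek-first check can never fire on a name with an accent head.
--     stack = []
--     name = var_name
--     while True:
--         for key, cmd in latex_accents.items():
--             if name.startswith(key + '_'):
--                 stack.append(cmd)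
--                 name = name[len(key) + 1:]
--                 break
--         else:
--             break
--     # Phase 2: render the core.
--     if name in greek_symbols:
--         core = greek_symbols[name]
--     elif '_' in name:
--         head, _sep, tail = name.partition('_')
--         core = convert_to_greek(head) + '_{' + tail.replace('_', '\\_') + '}'
--     else:
--         core = convert_to_greek(name)
--     # Phase 3: wrap collected accents, innermost = last peeled.
--     while stack:
--         core = stack.pop() + '{' + core + '}'
--     return core
-- ===== Notes on version B (the rewrite author's own statement) =====
-- stated objective: alternative
-- what changed: B replaces A's greek-check-then-split recursion by a three-phase pass: first peel all leading accent prefixes by direct string-prefix matching against 'key_' (no split, no greek check per level), then render the core once (greek lookup / partition subscript), then wrap the collected accent commands; correctness rests on the fact that no greek_symbols key begins with an accent prefix.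
import Mathlib
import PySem

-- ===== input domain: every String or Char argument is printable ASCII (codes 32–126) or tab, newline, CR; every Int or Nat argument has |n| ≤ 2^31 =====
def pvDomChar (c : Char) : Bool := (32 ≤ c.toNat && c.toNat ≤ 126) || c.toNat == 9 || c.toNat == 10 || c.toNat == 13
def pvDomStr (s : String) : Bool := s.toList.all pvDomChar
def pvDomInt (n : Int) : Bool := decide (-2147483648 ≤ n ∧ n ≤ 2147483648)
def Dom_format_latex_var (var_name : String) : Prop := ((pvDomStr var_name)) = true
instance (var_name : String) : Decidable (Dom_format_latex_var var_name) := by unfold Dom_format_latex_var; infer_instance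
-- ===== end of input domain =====

-- B replaces A's greek-check-then-split recursion by three phases: peel all leading accent
-- prefixes by direct prefix matching, render the core once, then wrap (objective: alternative).

-- ===== PORT A =====
def greekD : PySem.Dict String String := PySem.Dict.ofList
  [("alpha", "\\alpha"), ("beta", "\\beta"), ("gamma", "\\gamma"), ("delta", "\\delta"),
   ("epsilon", "\\epsilon"), ("zeta", "\\zeta"), ("eta", "\\eta"), ("theta", "\\theta"),
   ("iota", "\\iota"), ("kappa", "\\kappa"), ("lambda_", "\\lambda"), ("mu", "\\mu"),
   ("nu", "\\nu"), ("xi", "\\xi"), ("omicron", "o"), ("pi", "\\pi"), ("rho", "\\rho"),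
   ("sigma", "\\sigma"), ("tau", "\\tau"), ("upsilon", "\\upsilon"), ("phi", "\\phi"),
   ("chi", "\\chi"), ("psi", "\\psi"), ("omega", "\\omega")]

def accentD : PySem.Dict String String := PySem.Dict.ofList
  [("bar", "\\bar"), ("hat", "\\hat"), ("tilde", "\\tilde"), ("vec", "\\vec"),
   ("dot", "\\dot"), ("ddot", "\\ddot")]

def convert_to_greek (var_name : String) : String :=
  greekD.getD (PySem.Str.lower var_name) var_name

-- termination helpers for port A: split('_', 1) characterised, its tail shorter than the input
theorem splitgo_zero (fuel : Nat) (l cur : List Char) (acc : List (List Char)) :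
    PySem.Chars.splitOnMax.go ['_'] fuel 0 l cur acc = ((cur.reverse ++ l) :: acc).reverse := by
  cases fuel with
  | zero => rw [PySem.Chars.splitOnMax.go]
  | succ f => cases l with
    | nil => rw [PySem.Chars.splitOnMax.go]; simp; omega
    | cons c rest => rw [PySem.Chars.splitOnMax.go]; simp

theorem splitgo_one (fuel : Nat) (l cur : List Char) (acc : List (List Char)) (hf : l.length < fuel) :
    PySem.Chars.splitOnMax.go ['_'] fuel 1 l cur acc =
      if '_' ∈ l then
        acc.reverse ++ [cur.reverse ++ l.takeWhile (· != '_'),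
          l.drop ((l.takeWhile (· != '_')).length + 1)]
      else acc.reverse ++ [cur.reverse ++ l] := by
  induction fuel generalizing l cur acc with
  | zero => omega
  | succ f ih =>
    cases l with
    | nil => rw [PySem.Chars.splitOnMax.go]; simp; omega
    | cons c rest =>
      rw [PySem.Chars.splitOnMax.go]
      by_cases hc : c = '_'
      · subst hc
        simp [List.isPrefixOf, splitgo_zero]
      · have hp : (['_'].isPrefixOf (c :: rest)) = false := by
          simp [List.isPrefixOf]; exact fun h => absurd h.symm hc
        simp only [hp, if_neg (by omega : ¬ (1 : Nat) = 0), Bool.false_eq_true, if_false]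
        rw [ih rest (c :: cur) acc (by simpa using Nat.lt_of_succ_lt_succ hf)]
        by_cases hm : '_' ∈ rest <;> simp [hm, hc, Ne.symm hc]

theorem split_char (s : String) (h : PySem.Str.isIn "_" s = true) :
    (PySem.Str.splitMax? s "_" 1).getD [] =
      [String.ofList (s.toList.takeWhile (· != '_')),
       String.ofList (s.toList.drop ((s.toList.takeWhile (· != '_')).length + 1))] := by
  have hm : '_' ∈ s.toList := by
    have := (PySem.Str.isIn_iff_infix "_" s).mp h
    exact this.subset (by simp)
  simp only [PySem.Str.splitMax?, PySem.Chars.splitMax?, PySem.Chars.splitOnMax]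
  rw [if_neg (by simp), if_neg (by norm_num)]
  rw [show ("_" : String).toList = ['_'] from rfl,
    show ((1:Int)).toNat = 1 from rfl]
  rw [splitgo_one _ _ _ _ (by omega)]
  simp [hm]

theorem pv_part2_lt (s : String) (h : PySem.Str.isIn "_" s = true) :
    (((PySem.Str.splitMax? s "_" 1).getD []).getD 1 "").toList.length < s.toList.length := by
  have hm : '_' ∈ s.toList := by
    have := (PySem.Str.isIn_iff_infix "_" s).mp h
    exact this.subset (by simp)
  rw [split_char s h]
  simp only [List.getD]
  simp only [List.getElem?_cons_succ, List.getElem?_cons_zero, Option.getD_some,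
    String.toList_ofList, List.length_drop]
  have : s.toList.length ≠ 0 := by
    intro h0; rw [List.length_eq_zero_iff] at h0; simp [h0] at hm
  omega

def format_latex_var (var_name : String) : String :=
  if greekD.contains var_name then (greekD.get? var_name).getD ""
  else if h : PySem.Str.isIn "_" var_name then
    let parts := (PySem.Str.splitMax? var_name "_" 1).getD []
    let part1 := parts.getD 0 ""
    let part2 := parts.getD 1 ""
    if accentD.contains part1 then
      let accent_cmd := (accentD.get? part1).getD ""
      let inner_var_latex := format_latex_var part2
      accent_cmd ++ "{" ++ inner_var_latex ++ "}"
    else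
      let base := convert_to_greek part1
      let subscript := PySem.Str.replace part2 "_" "\\_"
      base ++ "_{" ++ subscript ++ "}"
  else convert_to_greek var_name
termination_by var_name.toList.length
decreasing_by exact pv_part2_lt var_name h

-- ===== PORT B =====
-- the items of latex_accents, iterated in insertion order by the inner for loop
def accent_items : List (String × String) :=
  [("bar", "\\bar"), ("hat", "\\hat"), ("tilde", "\\tilde"), ("vec", "\\vec"),
   ("dot", "\\dot"), ("ddot", "\\ddot")]

-- the inner "for key, cmd in latex_accents.items(): if name.startswith(key + '_')" scan
def find_accent (name : String) : Option (String × String) :=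
  accent_items.find? (fun kv => PySem.Str.startswith name (kv.1 ++ "_"))

-- termination helper for the peel loop: a peeled name is strictly shorter
theorem pv_peel_lt (name : String) (kv : String × String)
    (h : find_accent name = some kv) :
    (String.ofList (name.toList.drop (kv.1.toList.length + 1))).toList.length
      < name.toList.length := by
  have hp := List.find?_some h
  rw [PySem.Str.startswith_eq] at hp
  have hpre := (PySem.Chars.startswith_iff _ _).mp hp
  have hlen : kv.1.toList.length + 1 ≤ name.toList.length := by
    have := hpre.length_le
    simpa using this
  simp only [String.toList_ofList, List.length_drop]
  omega

-- Phase 1: peel all leading accent prefixes, collecting their commands (stack.append)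
def peel_accents (stack : List String) (name : String) : List String × String :=
  match h : find_accent name with
  | some kv =>
      peel_accents (stack ++ [kv.2])
        (String.ofList (name.toList.drop (kv.1.toList.length + 1)))  -- name[len(key)+1:]
  | none => (stack, name)
termination_by name.toList.length
decreasing_by exact pv_peel_lt name kv h

-- Phase 2: render the core (greek exact key / partition subscript / plain conversion)
def core_latex (name : String) : String :=
  if greekD.contains name then (greekD.get? name).getD ""
  else if PySem.Str.isIn "_" name then
    let head := String.ofList (name.toList.takeWhile (· != '_'))  -- name.partition('_')
    let tail := String.ofList
      (name.toList.drop ((name.toList.takeWhile (· != '_')).length + 1))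
    convert_to_greek head ++ "_{" ++ PySem.Str.replace tail "_" "\\_" ++ "}"
  else convert_to_greek name

-- Phase 3: pop the stack back-to-front and wrap
def format_latex_var_alt (var_name : String) : String :=
  let p := peel_accents [] var_name
  p.1.reverse.foldl (fun core cmd => cmd ++ "{" ++ core ++ "}") (core_latex p.2)

-- ===== PRECONDITION & SPEC =====
def Spec_format_latex_var (var_name : String) (out : String) : Prop := out = format_latex_var_alt var_name
instance (var_name : String) (out : String) : Decidable (Spec_format_latex_var var_name out) := by unfold Spec_format_latex_var; infer_instance

-- ===== CLAIM (what is proved, stated in full; the proofs are below) =====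
def Claim_equal_format_latex_var : Prop := ∀ (var_name : String), Dom_format_latex_var var_name → Spec_format_latex_var var_name (format_latex_var var_name)

-- ===== LEMMAS AND PROOFS =====

-- a list containing '_' decomposes around its first '_'
theorem mem_decomp (l : List Char) (h : '_' ∈ l) :
    l = l.takeWhile (· != '_') ++ '_' :: l.drop ((l.takeWhile (· != '_')).length + 1) := by
  induction l with
  | nil => simp at h
  | cons c rest ih =>
    by_cases hc : c = '_'
    · subst hc; simp [List.takeWhile]
    · have hm : '_' ∈ rest := by
        cases h with
        | head => exact absurd rfl hc
        | tail _ h' => exact h'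
      have hrec := ih hm
      have hcb : (c != '_') = true := by simpa using hc
      simp only [List.takeWhile, hcb, List.length_cons, List.cons_append,
        List.drop_succ_cons]
      exact congrArg (c :: ·) hrec

-- dropping a prefix plus one element
theorem drop_cons_len (k : List Char) (c : Char) (s : List Char) :
    (k ++ c :: s).drop (k.length + 1) = s := by
  rw [show k.length + 1 = (k ++ [c]).length by simp,
    show k ++ c :: s = (k ++ [c]) ++ s by simp, List.drop_left]

-- takeWhile / drop on an explicit decomposition with an underscore-free head
theorem tw_drop (k rest : List Char) (hk : '_' ∉ k) :
    (k ++ '_' :: rest).takeWhile (· != '_') = k ∧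
      (k ++ '_' :: rest).drop (k.length + 1) = rest := by
  induction k with
  | nil => simp [List.takeWhile]
  | cons c k ih =>
    have hc : c ≠ '_' := fun h => hk (by simp [h])
    have := ih (fun h => hk (by simp [h]))
    constructor
    · simp [List.takeWhile, hc, this.1]
    · simpa using this.2

-- the accent scan succeeds whenever the first '_'-segment is an accent key
theorem pred_of_head (name k : String) (hm : '_' ∈ name.toList)
    (htw : name.toList.takeWhile (· != '_') = k.toList) :
    PySem.Str.startswith name (k ++ "_") = true := by
  rw [PySem.Str.startswith_eq]
  apply (PySem.Chars.startswith_iff _ _).mpr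
  have hd := mem_decomp name.toList hm
  rw [htw] at hd
  refine ⟨name.toList.drop (k.toList.length + 1), ?_⟩
  conv_rhs => rw [hd]
  simp

-- a successful scan: membership plus the decomposition of the name
theorem find_accent_some_decomp (name : String) (kv : String × String)
    (h : find_accent name = some kv) :
    kv ∈ accent_items ∧
      name.toList = kv.1.toList ++ '_' ::
        name.toList.drop (kv.1.toList.length + 1) := by
  refine ⟨List.mem_of_find?_eq_some h, ?_⟩
  have hp := List.find?_some h
  rw [PySem.Str.startswith_eq] at hp
  obtain ⟨suf, hsuf⟩ := (PySem.Chars.startswith_iff _ _).mp hp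
  have h2 : name.toList = kv.1.toList ++ '_' :: suf := by
    rw [← hsuf]; simp
  have h3 : name.toList.drop (kv.1.toList.length + 1) = suf := by
    rw [h2, drop_cons_len]
  rw [h3]; exact h2

-- no greek key starts with an accent prefix
theorem greek_not_accent (name : String) (kv : String × String)
    (hkv : kv ∈ accent_items)
    (hp : PySem.Str.startswith name (kv.1 ++ "_") = true) :
    greekD.contains name = false := by
  cases hb : greekD.contains name with
  | false => rfl
  | true =>
    exfalso
    have hmem := (PySem.Dict.contains_iff_mem_keys _ _).mp hb
    have hkeys : greekD.keys = ["alpha", "beta", "gamma", "delta", "epsilon", "zeta",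
        "eta", "theta", "iota", "kappa", "lambda_", "mu", "nu", "xi", "omicron", "pi",
        "rho", "sigma", "tau", "upsilon", "phi", "chi", "psi", "omega"] := by decide
    rw [hkeys] at hmem
    simp only [List.mem_cons, List.mem_singleton, List.not_mem_nil, or_false] at hmem
    rcases hmem with rfl|rfl|rfl|rfl|rfl|rfl|rfl|rfl|rfl|rfl|rfl|rfl|rfl|rfl|rfl|rfl|rfl|rfl|rfl|rfl|rfl|rfl|rfl|rfl <;>
      fin_cases hkv <;> revert hp <;> decide

-- accent keys contain no underscore (needed to identify split('_',1)[0])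
theorem accent_key_no_underscore (kv : String × String) (hkv : kv ∈ accent_items) :
    '_' ∉ kv.1.toList := by
  fin_cases hkv <;> decide

-- accentD lookup facts at a member of accent_items
theorem accentD_lookup (kv : String × String) (hkv : kv ∈ accent_items) :
    accentD.contains kv.1 = true ∧ accentD.get? kv.1 = some kv.2 := by
  fin_cases hkv <;> exact ⟨by decide, by decide⟩

-- when the scan succeeds, A takes its accent branch with exactly this key and tail
theorem fmt_accent_step (name : String) (kv : String × String)
    (h : find_accent name = some kv) :
    format_latex_var name =
      kv.2 ++ "{" ++
        format_latex_var (String.ofList (name.toList.drop (kv.1.toList.length + 1)))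
        ++ "}" := by
  obtain ⟨hkv, hd⟩ := find_accent_some_decomp name kv h
  have hp := List.find?_some h
  have hg := greek_not_accent name kv hkv hp
  have hm : '_' ∈ name.toList := by rw [hd]; simp
  have hin : PySem.Str.isIn "_" name = true := by
    apply (PySem.Str.isIn_iff_infix _ _).mpr
    rw [show ("_" : String).toList = ['_'] from rfl]
    have hinf : kv.1.toList ++ ['_'] ++ name.toList.drop (kv.1.toList.length + 1)
        = name.toList := by
      conv_rhs => rw [hd]
      simp
    exact ⟨kv.1.toList, name.toList.drop (kv.1.toList.length + 1), hinf⟩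
  have htw : name.toList.takeWhile (· != '_') = kv.1.toList := by
    conv_lhs => rw [hd]
    exact (tw_drop _ _ (accent_key_no_underscore kv hkv)).1
  have hsplit := split_char name hin
  rw [format_latex_var]
  rw [if_neg (by simp [hg]), dif_pos hin]
  simp only [hsplit, List.getD, List.getElem?_cons_zero, List.getElem?_cons_succ,
    Option.getD_some, htw]
  have hstr : String.ofList kv.1.toList = kv.1 := by simp
  rw [hstr]
  have := accentD_lookup kv hkv
  rw [if_pos this.1, this.2]
  rfl

-- when the scan fails, A's result is B's core
theorem fmt_core (name : String) (h : find_accent name = none) :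
    format_latex_var name = core_latex name := by
  rw [format_latex_var, core_latex]
  by_cases hg : greekD.contains name = true
  · rw [if_pos hg, if_pos hg]
  · rw [if_neg hg, if_neg hg]
    by_cases hin : PySem.Str.isIn "_" name = true
    · rw [dif_pos hin, if_pos hin]
      have hm : '_' ∈ name.toList := by
        have := (PySem.Str.isIn_iff_infix "_" name).mp hin
        exact this.subset (by simp)
      have hsplit := split_char name hin
      simp only [hsplit, List.getD, List.getElem?_cons_zero, List.getElem?_cons_succ,
        Option.getD_some]
      -- A's accent test on the head must fail, else find_accent would have succeeded
      have hna : accentD.contains (String.ofList (name.toList.takeWhile (· != '_'))) = false := by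
        cases hb : accentD.contains (String.ofList (name.toList.takeWhile (· != '_'))) with
        | false => rfl
        | true =>
          exfalso
          have hmem := (PySem.Dict.contains_iff_mem_keys _ _).mp hb
          have hkeys : accentD.keys = ["bar", "hat", "tilde", "vec", "dot", "ddot"] := by decide
          rw [hkeys] at hmem
          simp only [List.mem_cons, List.not_mem_nil, or_false] at hmem
          have contra : ∀ (k c : String), (k, c) ∈ accent_items →
              String.ofList (name.toList.takeWhile (· != '_')) = k → False := by
            intro k c hkc hek
            have htw2 : name.toList.takeWhile (· != '_') = k.toList := by
              rw [← hek]; simp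
            exact absurd (pred_of_head name k hm htw2)
              (by simpa using List.find?_eq_none.mp h (k, c) hkc)
          rcases hmem with he|he|he|he|he|he
          · exact contra "bar" "\\bar" (by decide) he
          · exact contra "hat" "\\hat" (by decide) he
          · exact contra "tilde" "\\tilde" (by decide) he
          · exact contra "vec" "\\vec" (by decide) he
          · exact contra "dot" "\\dot" (by decide) he
          · exact contra "ddot" "\\ddot" (by decide) he
      rw [if_neg (by simp [hna])]
    · rw [dif_neg hin, if_neg hin]

-- the peel loop plus final wrapping computes A's recursion
theorem peel_spec (stack : List String) (name : String) :
    (peel_accents stack name).1.reverse.foldl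
        (fun core cmd => cmd ++ "{" ++ core ++ "}")
        (core_latex (peel_accents stack name).2)
      = stack.reverse.foldl (fun core cmd => cmd ++ "{" ++ core ++ "}")
          (format_latex_var name) := by
  fun_induction peel_accents stack name with
  | case1 stack name kv h ih =>
      rw [ih, fmt_accent_step name kv h]
      simp
  | case2 stack name h =>
      rw [fmt_core name h]

-- ===== VERDICT (by name: the statement is the Claim_ definition above) =====
theorem format_latex_var_spec : Claim_equal_format_latex_var := by
  intro v _
  unfold Spec_format_latex_var format_latex_var_alt
  exact (peel_spec [] v).symm
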